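-- pv_equiv track=rewrite | github.com/s-owl/algossstudy | harvey/1037.py | solv
-- ===== SOURCE A (Python) =====
-- def solv(l):
--     minv = maxv = l[0]
--     for i in range(len(l)):
--         if minv > l[i]:
--             minv = l[i]
--         if maxv < l[i]:
--             maxv = l[i]
--
--     return minv * maxv
-- ===== SOURCE B (Python) =====
-- def solv(l):
--     nums = sorted(l)
--     return nums[0] * nums[-1]
-- ===== Notes on version B (the rewrite author's own statement) =====
-- stated objective: simpler
-- what changed: Replaces A's combined min/max scan with tracked accumulators by sorting a copy of the list and multiplying its first and last elements.
import Mathlib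
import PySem

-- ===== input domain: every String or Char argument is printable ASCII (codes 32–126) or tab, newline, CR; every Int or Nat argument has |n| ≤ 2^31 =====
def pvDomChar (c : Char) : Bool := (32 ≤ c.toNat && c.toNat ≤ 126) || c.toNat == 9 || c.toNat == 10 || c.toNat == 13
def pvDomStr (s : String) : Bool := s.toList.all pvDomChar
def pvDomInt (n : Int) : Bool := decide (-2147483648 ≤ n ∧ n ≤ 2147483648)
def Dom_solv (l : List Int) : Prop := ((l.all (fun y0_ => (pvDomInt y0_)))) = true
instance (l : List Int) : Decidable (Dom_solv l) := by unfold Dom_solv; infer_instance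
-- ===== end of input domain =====

-- B sorts a copy of the list and multiplies its first and last elements,
-- instead of A's single scan tracking min/max accumulators (objective: simpler).


-- ===== PORT A =====
-- minv = maxv = l[0]; for i in range(len(l)): update minv/maxv; return minv * maxv
-- (l[0]/l[i] ported with pyGetD; the IndexError on [] is excluded by Pre_solv)
def solv (l : List Int) : Int :=
  ((PySem.List.pyRange 0 (PySem.List.len l)).foldl
      (fun (p : Int × Int) i =>
        (if p.1 > PySem.List.pyGetD l i 0 then PySem.List.pyGetD l i 0 else p.1,
         if p.2 < PySem.List.pyGetD l i 0 then PySem.List.pyGetD l i 0 else p.2))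
      (PySem.List.pyGetD l 0 0, PySem.List.pyGetD l 0 0)).1 *
  ((PySem.List.pyRange 0 (PySem.List.len l)).foldl
      (fun (p : Int × Int) i =>
        (if p.1 > PySem.List.pyGetD l i 0 then PySem.List.pyGetD l i 0 else p.1,
         if p.2 < PySem.List.pyGetD l i 0 then PySem.List.pyGetD l i 0 else p.2))
      (PySem.List.pyGetD l 0 0, PySem.List.pyGetD l 0 0)).2

-- ===== PORT B =====
-- nums = sorted(l); return nums[0] * nums[-1]  (nums[0]'s IndexError on [] is excluded by Pre_solv)
def solv_alt (l : List Int) : Int :=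
  PySem.List.pyGetD (PySem.List.sorted l (fun x => x)) 0 0 *
  PySem.List.pyGetD (PySem.List.sorted l (fun x => x)) (-1) 0

-- ===== PRECONDITION & SPEC =====
-- Pre_ excludes only the empty list, on which both A (l[0]) and B (nums[0]) raise IndexError.
def Pre_solv (l : List Int) : Prop := l ≠ []
instance (l : List Int) : Decidable (Pre_solv l) := by unfold Pre_solv; infer_instance
def pvWitness_solv : List Int := [3, -1, 4]
def Spec_solv (l : List Int) (out : Int) : Prop := out = solv_alt l
instance (l : List Int) (out : Int) : Decidable (Spec_solv l out) := by unfold Spec_solv; infer_instance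

-- ===== CLAIM (what is proved, stated in full; the proofs are below) =====
def Claim_equal_solv : Prop := ∀ (l : List Int), Dom_solv l → Pre_solv l → Spec_solv l (solv l)

-- ===== LEMMAS AND PROOFS =====

-- A's paired fold splits into independent min- and max-folds.
theorem pv_fold_pair (l : List Int) (p : Int × Int) :
    l.foldl (fun (p : Int × Int) x =>
      (if p.1 > x then x else p.1, if p.2 < x then x else p.2)) p
    = (l.foldl min p.1, l.foldl max p.2) := by
  induction l generalizing p with
  | nil => rfl
  | cons a t ih =>
      simp only [List.foldl_cons, ih]
      congr 1
      · have : (if p.1 > a then a else p.1) = min p.1 a := by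
          rw [min_def]; split_ifs <;> omega
        rw [this]
      · have : (if p.2 < a then a else p.2) = max p.2 a := by
          rw [max_def]; split_ifs <;> omega
        rw [this]

theorem pv_foldl_min_mem (t : List Int) (a : Int) : t.foldl min a ∈ a :: t := by
  induction t generalizing a with
  | nil => simp
  | cons b t ih =>
      rw [List.foldl_cons]
      rcases List.mem_cons.mp (ih (min a b)) with h | h
      · rw [h]; rcases min_choice a b with hm | hm <;> rw [hm] <;> simp
      · exact List.mem_cons_of_mem _ (List.mem_cons_of_mem _ h)

theorem pv_foldl_max_mem (t : List Int) (a : Int) : t.foldl max a ∈ a :: t := by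
  induction t generalizing a with
  | nil => simp
  | cons b t ih =>
      rw [List.foldl_cons]
      rcases List.mem_cons.mp (ih (max a b)) with h | h
      · rw [h]; rcases max_choice a b with hm | hm <;> rw [hm] <;> simp
      · exact List.mem_cons_of_mem _ (List.mem_cons_of_mem _ h)

theorem pv_foldl_min_le (t : List Int) (a : Int) :
    t.foldl min a ≤ a ∧ ∀ y ∈ t, t.foldl min a ≤ y := by
  induction t generalizing a with
  | nil => simp
  | cons b t ih =>
      have h := ih (min a b)
      refine ⟨le_trans h.1 (min_le_left _ _), ?_⟩
      intro y hy
      rcases List.mem_cons.mp hy with rfl | hy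
      · exact le_trans h.1 (min_le_right _ _)
      · exact h.2 y hy

-- last element of a ≤-sorted nonempty list bounds every element
theorem pv_getLast_ge (ys : List Int) (hp : ys.Pairwise (· ≤ ·)) (hne : ys ≠ []) :
    ∀ y ∈ ys, y ≤ ys.getLast hne := by
  induction ys with
  | nil => simp at hne
  | cons a t ih =>
      intro y hy
      cases t with
      | nil => simp at hy; simp [hy]
      | cons b s =>
          have hp' := (List.pairwise_cons.mp hp).2
          have hab := (List.pairwise_cons.mp hp).1
          have hlast : (a :: b :: s).getLast hne = (b :: s).getLast (by simp) := by
            simp [List.getLast_cons]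
          rcases List.mem_cons.mp hy with rfl | hy
          · have hb : y ≤ b := hab b (by simp)
            have := ih hp' (by simp) b (by simp)
            rw [hlast]; exact le_trans hb this
          · rw [hlast]; exact ih hp' (by simp) y hy

theorem pv_pyGetD_last (ys : List Int) (hne : ys ≠ []) :
    PySem.List.pyGetD ys (-1) 0 = ys.getLast hne := by
  cases ys with
  | nil => simp at hne
  | cons a t =>
      simp [PySem.List.pyGetD, PySem.List.pyGet?, PySem.List.pyIdx?]
      rw [List.getLast_eq_getElem]
      congr 1

-- ===== VERDICT (by name: the statement is the Claim_ definition above) =====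
theorem solv_spec : Claim_equal_solv := by
  intro l _ hpre
  cases l with
  | nil => exact absurd rfl hpre
  | cons a t =>
      show solv (a :: t) = solv_alt (a :: t)
      unfold solv solv_alt
      rw [PySem.List.foldl_pyRange_zero_pyGetD (a :: t) 0
            (fun (p : Int × Int) x =>
              (if p.1 > x then x else p.1, if p.2 < x then x else p.2))
            (PySem.List.pyGetD (a :: t) 0 0, PySem.List.pyGetD (a :: t) 0 0)]
      rw [pv_fold_pair]
      have hinit : PySem.List.pyGetD (a :: t) 0 0 = a := by
        simp [PySem.List.pyGetD, PySem.List.pyGet?, PySem.List.pyIdx?]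
      rw [hinit]
      simp only [List.foldl_cons, min_self, max_self]
      obtain ⟨m, s, hsort⟩ : ∃ m s, PySem.List.sorted (a :: t) (fun x => x) = m :: s := by
        rcases h : PySem.List.sorted (a :: t) (fun x => x) with _ | ⟨m, s⟩
        · exact absurd ((PySem.List.sorted_eq_nil_iff _ _ _).mp h) (by simp)
        · exact ⟨m, s, rfl⟩
      rw [hsort]
      have hne : m :: s ≠ [] := by simp
      rw [pv_pyGetD_last (m :: s) hne]
      have hmem_sorted : ∀ x, x ∈ m :: s ↔ x ∈ a :: t := by
        intro x; rw [← hsort]; exact PySem.List.mem_sorted _ _ _ x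
      have hmin : m = t.foldl min a := by
        have h1 : m ≤ t.foldl min a := by
          have := PySem.List.key_head_sorted_le (a :: t) (fun x => x) hsort
          exact this _ (pv_foldl_min_mem t a)
        have h2 : t.foldl min a ≤ m := by
          have hm : m ∈ a :: t := (hmem_sorted m).mp (by simp)
          rcases List.mem_cons.mp hm with rfl | hm
          · exact (pv_foldl_min_le t m).1
          · exact (pv_foldl_min_le t a).2 m hm
        omega
      have hpair : (m :: s).Pairwise (· ≤ ·) := by
        rw [← hsort]; exact PySem.List.sorted_pairwise _ _
      have hmax : (m :: s).getLast hne = t.foldl max a := by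
        have h1 : t.foldl max a ≤ (m :: s).getLast hne := by
          have hmem : t.foldl max a ∈ m :: s :=
            (hmem_sorted _).mpr (pv_foldl_max_mem t a)
          exact pv_getLast_ge (m :: s) hpair hne _ hmem
        have h2 : (m :: s).getLast hne ≤ t.foldl max a := by
          have hg : (m :: s).getLast hne ∈ a :: t :=
            (hmem_sorted _).mp (List.getLast_mem hne)
          have hle := PySem.List.le_foldl_max t a
          rcases List.mem_cons.mp hg with hg | hg
          · rw [hg]; exact hle.1
          · exact hle.2 _ hg
        omega
      have hhead : PySem.List.pyGetD (m :: s) 0 0 = m := by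
        simp [PySem.List.pyGetD, PySem.List.pyGet?, PySem.List.pyIdx?]
      rw [hhead, hmax, hmin]
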